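-- pv_equiv track=rewrite | github.com/g-simonetti/DWF_workflow | src/residual_mass/residual_mass_plateau.py | select_numbers_by_delta
-- ===== SOURCE A (Python) =====
-- def select_numbers_by_delta(numbers_sorted: list[int], delta_traj_ps: int) -> list[int]:
--     """
--     numbers_sorted must already be therm-cut and sorted.
--     Keep arithmetic progression start=numbers_sorted[0], then start + k*delta_traj_ps (if present).
--
--     If delta_traj_ps <= 0, return full list.
--     """
--     if not numbers_sorted:
--         return []
--     delta_traj_ps = int(delta_traj_ps)
--     if delta_traj_ps <= 0:
--         return list(numbers_sorted)
--
--     start = numbers_sorted[0]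
--     num_set = set(numbers_sorted)
--     last = numbers_sorted[-1]
--
--     keep: list[int] = []
--     k = 0
--     while True:
--         n = start + k * delta_traj_ps
--         if n in num_set:
--             keep.append(n)
--         if n > last:
--             break
--         k += 1
--
--     return sorted(set(keep))
-- ===== SOURCE B (Python) =====
-- def select_numbers_by_delta(numbers_sorted: list[int], delta_traj_ps: int) -> list[int]:
--     """Keep the entries lying on the arithmetic progression that starts at the first
--     element with step delta_traj_ps, by a single congruence-filtering pass."""
--     if not numbers_sorted:
--         return []
--     delta = int(delta_traj_ps)
--     if delta <= 0:
--         return list(numbers_sorted)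
--     start = numbers_sorted[0]
--     return sorted({n for n in numbers_sorted if (n - start) % delta == 0})
-- ===== Notes on version B (the rewrite author's own statement) =====
-- stated objective: simpler
-- what changed: Instead of walking every point of the arithmetic progression from the first entry up past the last entry and probing a set, B makes one congruence-filtering pass over the list itself; Pre_ restricts to the function's documented domain (numbers_sorted sorted ascending when delta_traj_ps > 0) — on unsorted lists the docstring's contract is violated and A's windowing to [first element, last element] and B's keeping of every congruent entry are both defensible readings.
-- outside the precondition, e.g. on select_numbers_by_delta([3, 1, 2], 1): A returns [3], B returns [1, 2, 3]
import Mathlib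
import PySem

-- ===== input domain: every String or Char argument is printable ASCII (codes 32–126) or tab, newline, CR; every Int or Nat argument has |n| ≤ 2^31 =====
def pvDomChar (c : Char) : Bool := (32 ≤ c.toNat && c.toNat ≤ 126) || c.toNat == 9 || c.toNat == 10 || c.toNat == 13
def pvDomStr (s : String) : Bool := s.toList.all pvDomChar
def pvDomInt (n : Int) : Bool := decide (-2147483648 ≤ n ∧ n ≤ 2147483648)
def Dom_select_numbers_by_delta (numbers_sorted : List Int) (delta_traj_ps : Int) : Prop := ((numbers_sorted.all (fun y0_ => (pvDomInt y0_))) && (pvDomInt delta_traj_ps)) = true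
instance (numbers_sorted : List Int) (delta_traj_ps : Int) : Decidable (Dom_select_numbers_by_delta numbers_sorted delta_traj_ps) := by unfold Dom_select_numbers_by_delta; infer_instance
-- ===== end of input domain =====

-- B replaces A's walk over every point of the arithmetic progression (probing a set) by a
-- single congruence-filtering pass over the list itself (objective: simpler).

-- ===== PORT A =====
-- the `while True` loop of A, structurally recursive on a fuel that provably exceeds the
-- number of iterations (delta > 0 there), so the computation is the same on every reached step
def pvLoopA (S : PySem.Set Int) (start last delta k : Int) (keep : List Int) : Nat → List Int
  | 0 => keep
  | fuel + 1 =>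
    if PySem.Set.contains S (start + k * delta) then
      if start + k * delta > last then keep ++ [start + k * delta]
      else pvLoopA S start last delta (k + 1) (keep ++ [start + k * delta]) fuel
    else
      if start + k * delta > last then keep
      else pvLoopA S start last delta (k + 1) keep fuel

def select_numbers_by_delta (numbers_sorted : List Int) (delta_traj_ps : Int) : List Int :=
  if numbers_sorted = [] then []
  else if delta_traj_ps <= 0 then numbers_sorted
  else
    -- numbers_sorted[0] / numbers_sorted[-1]: the list is nonempty here, so headI/getLastD are exact
    PySem.List.sorted
      (PySem.Set.ofList
        (pvLoopA (PySem.Set.ofList numbers_sorted) numbers_sorted.headI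
          (numbers_sorted.getLastD 0) delta_traj_ps 0 []
          ((numbers_sorted.getLastD 0 - numbers_sorted.headI).toNat + 2)))
      (fun x => x) false

-- ===== PORT B =====
def select_numbers_by_delta_alt (numbers_sorted : List Int) (delta_traj_ps : Int) : List Int :=
  if numbers_sorted = [] then []
  else if delta_traj_ps ≤ 0 then numbers_sorted
  else
    PySem.List.sorted
      (PySem.Set.ofList
        (numbers_sorted.filter
          (fun n => PySem.Int.mod (n - numbers_sorted.headI) delta_traj_ps == 0)))
      (fun x => x) false

-- ===== PRECONDITION & SPEC =====
-- Pre_ restricts to the function's documented domain: the docstring requires numbers_sorted to be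
-- sorted ascending (relevant only when delta_traj_ps > 0). On unsorted lists the contract is
-- violated and A's windowing to [first element, last element] and B's keeping of every congruent
-- entry are both defensible readings of an unspecified corner.
def Pre_select_numbers_by_delta (numbers_sorted : List Int) (delta_traj_ps : Int) : Prop :=
  0 < delta_traj_ps → numbers_sorted.Pairwise (· ≤ ·)
instance (numbers_sorted : List Int) (delta_traj_ps : Int) : Decidable (Pre_select_numbers_by_delta numbers_sorted delta_traj_ps) := by unfold Pre_select_numbers_by_delta; infer_instance
def pvWitness_select_numbers_by_delta : List Int × Int := ([1, 3, 4, 5, 7], 2)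

def Spec_select_numbers_by_delta (numbers_sorted : List Int) (delta_traj_ps : Int) (out : List Int) : Prop := out = select_numbers_by_delta_alt numbers_sorted delta_traj_ps
instance (numbers_sorted : List Int) (delta_traj_ps : Int) (out : List Int) : Decidable (Spec_select_numbers_by_delta numbers_sorted delta_traj_ps out) := by unfold Spec_select_numbers_by_delta; infer_instance

-- ===== CLAIM (what is proved, stated in full; the proofs are below) =====
def Claim_equal_select_numbers_by_delta : Prop := ∀ (numbers_sorted : List Int) (delta_traj_ps : Int), Dom_select_numbers_by_delta numbers_sorted delta_traj_ps → Pre_select_numbers_by_delta numbers_sorted delta_traj_ps → Spec_select_numbers_by_delta numbers_sorted delta_traj_ps (select_numbers_by_delta numbers_sorted delta_traj_ps)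

-- ===== LEMMAS AND PROOFS =====

-- in a sorted nonempty list every element is bounded by the first and last entries
lemma sorted_headI_le (ns : List Int) (h : ns.Pairwise (· ≤ ·)) :
    ∀ x ∈ ns, ns.headI ≤ x := by
  cases ns with
  | nil => intro x hx; cases hx
  | cons a t =>
      intro x hx
      rcases List.mem_cons.1 hx with rfl | hx
      · exact le_refl x
      · exact (List.pairwise_cons.1 h).1 x hx

lemma sorted_le_getLastD (ns : List Int) (h : ns.Pairwise (· ≤ ·)) :
    ∀ x ∈ ns, x ≤ ns.getLastD 0 := by
  induction ns with
  | nil => intro x hx; cases hx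
  | cons a t ih =>
      intro x hx
      cases t with
      | nil =>
          rcases List.mem_cons.1 hx with rfl | hx
          · exact le_refl x
          · cases hx
      | cons b u =>
          have h' := List.pairwise_cons.1 h
          rcases List.mem_cons.1 hx with rfl | hx
          · exact le_trans (h'.1 b (List.mem_cons_self)) (ih h'.2 b (List.mem_cons_self))
          · exact ih h'.2 x hx

-- membership in A's loop result, when the fuel suffices: the kept elements are the set members
-- among the progression points the loop probes (each point whose predecessor was ≤ last, plus k itself)
lemma mem_pvLoopA (S : PySem.Set Int) (start last delta : Int) (hd : 0 < delta) :
    ∀ (fuel : Nat) (k : Int) (keep : List Int) (x : Int),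
      1 ≤ fuel → last + delta - (start + k * delta) + 1 ≤ delta * fuel →
      (x ∈ pvLoopA S start last delta k keep fuel ↔
        x ∈ keep ∨ (PySem.Set.contains S x = true ∧
          ∃ j : Int, 0 ≤ j ∧ x = start + (k + j) * delta ∧
            (j = 0 ∨ start + (k + (j - 1)) * delta ≤ last))) := by
  intro fuel
  induction fuel with
  | zero => intro k keep x h1 _; omega
  | succ fuel ih =>
      intro k keep x _ hfuel
      have hstep : start + (k + 1) * delta = start + k * delta + delta := by ring
      rw [pvLoopA]
      by_cases hgt : start + k * delta > last
      · -- the final probe: every later progression point fails the predecessor condition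
        have hiff : ∀ P : Prop,
            ((P ∧ x = start + k * delta) ↔
              (P ∧ ∃ j : Int, 0 ≤ j ∧ x = start + (k + j) * delta ∧
                (j = 0 ∨ start + (k + (j - 1)) * delta ≤ last))) := by
          intro P
          constructor
          · rintro ⟨hP, rfl⟩
            exact ⟨hP, 0, le_refl 0, by ring_nf, Or.inl rfl⟩
          · rintro ⟨hP, j, hj, rfl, hcond⟩
            refine ⟨hP, ?_⟩
            by_cases hj0 : j = 0
            · subst hj0; ring
            · exfalso
              have hle : start + (k + (j - 1)) * delta ≤ last := by
                rcases hcond with h0 | h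
                · exact absurd h0 hj0
                · exact h
              have hnn : 0 ≤ (j - 1) * delta := mul_nonneg (by omega) (le_of_lt hd)
              nlinarith [hnn, hle, hgt]
        by_cases hc : PySem.Set.contains S (start + k * delta) = true
        · rw [if_pos hc, if_pos hgt]
          constructor
          · intro hx
            rcases List.mem_append.1 hx with hx | hx
            · exact Or.inl hx
            · simp only [List.mem_singleton] at hx
              exact Or.inr ((hiff _).1 ⟨hx ▸ hc, hx⟩)
          · rintro (hx | hr)
            · exact List.mem_append.2 (Or.inl hx)
            · obtain ⟨_, hx⟩ := (hiff _).2 hr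
              exact List.mem_append.2 (Or.inr (List.mem_singleton.mpr hx))
        · rw [if_neg hc, if_pos hgt]
          refine ⟨Or.inl, ?_⟩
          rintro (hx | hr)
          · exact hx
          · obtain ⟨hSx, hx⟩ := (hiff _).2 hr
            exact absurd hSx (hx ▸ hc)
      · -- the loop continues: shift the probe index by one
        have hfuel1 : 1 ≤ fuel := by
          rcases Nat.eq_zero_or_pos fuel with rfl | h
          · norm_num at hfuel; omega
          · exact h
        have hfuel' : last + delta - (start + (k + 1) * delta) + 1 ≤ delta * fuel := by
          have : delta * (fuel + 1 : Nat) = delta * fuel + delta := by push_cast; ring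
          omega
        have hshift :
            (PySem.Set.contains S x = true ∧
              ∃ j : Int, 0 ≤ j ∧ x = start + (k + 1 + j) * delta ∧
                (j = 0 ∨ start + (k + 1 + (j - 1)) * delta ≤ last)) ∨ x = start + k * delta ↔
            (PySem.Set.contains S x = true ∧
              ∃ j : Int, 0 ≤ j ∧ x = start + (k + j) * delta ∧
                (j = 0 ∨ start + (k + (j - 1)) * delta ≤ last)) ∨ x = start + k * delta := by
          constructor
          · rintro (⟨hSx, j, hj, rfl, hcond⟩ | hx)
            · refine Or.inl ⟨hSx, j + 1, by omega, by ring_nf, Or.inr ?_⟩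
              rcases hcond with rfl | hle
              · simpa using hgt
              · have : start + (k + (j + 1 - 1)) * delta = start + (k + 1 + (j - 1)) * delta := by
                  ring
                omega
            · exact Or.inr hx
          · rintro (⟨hSx, j, hj, rfl, hcond⟩ | hx)
            · rcases eq_or_lt_of_le hj with rfl | hj1
              · exact Or.inr (by ring_nf)
              · refine Or.inl ⟨hSx, j - 1, by omega, by ring_nf, ?_⟩
                rcases hcond with rfl | hle
                · omega
                · by_cases hj2 : j - 1 = 0
                  · exact Or.inl hj2
                  · refine Or.inr ?_
                    have : start + (k + 1 + (j - 1 - 1)) * delta =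
                        start + (k + (j - 1)) * delta := by ring
                    omega
            · exact Or.inr hx
        by_cases hc : PySem.Set.contains S (start + k * delta) = true
        · rw [if_pos hc, if_neg hgt,
            ih (k + 1) (keep ++ [start + k * delta]) x hfuel1 hfuel']
          constructor
          · rintro (hx | ⟨hSx, hj⟩)
            · rcases List.mem_append.1 hx with hx | hx
              · exact Or.inl hx
              · simp only [List.mem_singleton] at hx
                rcases (hshift.1 (Or.inr hx)) with h | hx'
                · exact Or.inr h
                · subst hx'
                  exact Or.inr ⟨hc, 0, le_refl 0, by ring_nf, Or.inl rfl⟩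
            · rcases hshift.1 (Or.inl ⟨hSx, hj⟩) with h | hx'
              · exact Or.inr h
              · exact Or.inr ⟨hSx, 0, le_refl 0, by rw [hx']; ring, Or.inl rfl⟩
          · rintro (hx | ⟨hSx, hj⟩)
            · exact Or.inl (List.mem_append.2 (Or.inl hx))
            · rcases hshift.2 (Or.inl ⟨hSx, hj⟩) with h | hx'
              · exact Or.inr h
              · exact Or.inl (List.mem_append.2 (Or.inr (List.mem_singleton.mpr hx')))
        · rw [if_neg hc, if_neg hgt, ih (k + 1) keep x hfuel1 hfuel']
          constructor
          · rintro (hx | ⟨hSx, hj⟩)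
            · exact Or.inl hx
            · rcases hshift.1 (Or.inl ⟨hSx, hj⟩) with h | hx'
              · exact Or.inr h
              · exact absurd hSx (hx' ▸ hc)
          · rintro (hx | ⟨hSx, hj⟩)
            · exact Or.inl hx
            · rcases hshift.2 (Or.inl ⟨hSx, hj⟩) with h | hx'
              · exact Or.inr h
              · exact absurd hSx (hx' ▸ hc)

-- ===== VERDICT (by name: the statement is the Claim_ definition above) =====
theorem select_numbers_by_delta_spec : Claim_equal_select_numbers_by_delta := by
  intro ns d _ hpre
  unfold Spec_select_numbers_by_delta select_numbers_by_delta select_numbers_by_delta_alt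
  by_cases hnil : ns = []
  · simp [hnil]
  by_cases hle : d ≤ 0
  · simp [hnil, hle]
  have hd : 0 < d := by omega
  have hsorted : ns.Pairwise (· ≤ ·) := hpre hd
  simp only [hnil, hle, if_neg, not_false_iff]
  apply PySem.List.sorted_eq_sorted_of_perm _ _ _ (fun a b h => h)
  apply (List.perm_ext_iff_of_nodup (PySem.Set.nodup_ofList _) (PySem.Set.nodup_ofList _)).2
  intro x
  rw [PySem.Set.mem_ofList, PySem.Set.mem_ofList]
  set lo := ns.headI with hlo
  set hi := ns.getLastD 0 with hhi
  rw [mem_pvLoopA _ _ _ _ hd ((hi - lo).toNat + 2) 0 [] x (by omega)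
        (by
          have ht : (hi - lo : Int) ≤ ((hi - lo).toNat : Int) := Int.self_le_toNat _
          have ht0 : (0 : Int) ≤ ((hi - lo).toNat : Int) := Int.natCast_nonneg _
          have : d * (((hi - lo).toNat + 2 : Nat) : Int) =
              d * ((hi - lo).toNat : Int) + 2 * d := by push_cast; ring
          nlinarith)]
  simp only [List.not_mem_nil, false_or, List.mem_filter, PySem.Set.contains_iff,
    PySem.Set.mem_ofList, beq_iff_eq]
  constructor
  · rintro ⟨hx, j, hj, rfl, _⟩
    refine ⟨hx, ?_⟩
    rw [PySem.Int.mod_eq_zero_iff_dvd]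
    exact ⟨j, by ring⟩
  · rintro ⟨hx, hmod⟩
    rw [PySem.Int.mod_eq_zero_iff_dvd] at hmod
    obtain ⟨c, hc⟩ := hmod
    have hlox : lo ≤ x := sorted_headI_le ns hsorted x hx
    have hxhi : x ≤ hi := sorted_le_getLastD ns hsorted x hx
    have hc0 : 0 ≤ c := by nlinarith
    refine ⟨hx, c, hc0, by linear_combination hc, ?_⟩
    by_cases hc1 : c = 0
    · exact Or.inl hc1
    · refine Or.inr ?_
      have he1 : lo + (0 + (c - 1)) * d = x - d := by linear_combination -hc
      omega
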